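-- pv_equiv track=rewrite | github.com/andyjsiegel/CSC-120 | 2024_01_12_Short_Problems/cv_match.py | cv_match
-- ===== SOURCE A (Python) =====
-- def cv_match(sentence, pattern):
--     words = sentence.split()
--     words_that_match = []
--     for word in words:
--         if not len(word) == len(pattern):
--             continue
--         pattern_of_word = ""
--         for char in word:
--             if char not in "aeiouAEIOU":
--                 pattern_of_word += 'c'
--             else:
--                 pattern_of_word += 'v'
--         if pattern_of_word == pattern:
--             words_that_match.append(word)
--
--     return words_that_match
-- ===== SOURCE B (Python) =====
-- def cv_match(sentence, pattern):
--     index = {}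
--     for word in sentence.split():
--         key = ''.join('v' if ch in 'aeiouAEIOU' else 'c' for ch in word)
--         index.setdefault(key, []).append(word)
--     return index.get(pattern, [])
-- ===== Notes on version B (the rewrite author's own statement) =====
-- stated objective: alternative
-- what changed: B builds a dictionary indexing all words by their consonant/vowel key in one pass (dropping A's per-word length check and string equality test) and returns the bucket for the requested pattern.
import Mathlib
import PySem

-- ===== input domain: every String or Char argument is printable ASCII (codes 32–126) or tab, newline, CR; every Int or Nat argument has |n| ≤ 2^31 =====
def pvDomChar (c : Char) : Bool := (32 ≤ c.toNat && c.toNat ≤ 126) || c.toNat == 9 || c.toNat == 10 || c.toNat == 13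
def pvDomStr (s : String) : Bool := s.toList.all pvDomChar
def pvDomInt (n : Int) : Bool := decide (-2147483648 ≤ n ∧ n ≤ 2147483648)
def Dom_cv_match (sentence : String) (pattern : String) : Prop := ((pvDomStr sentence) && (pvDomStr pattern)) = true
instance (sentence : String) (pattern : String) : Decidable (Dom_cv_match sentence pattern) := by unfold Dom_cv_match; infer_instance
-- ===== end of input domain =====

-- B replaces A's per-word length check + built-pattern comparison by a one-pass dictionary
-- indexing every word under its consonant/vowel key, then looks the pattern up (objective: alternative).

-- ===== PORT A =====
-- literal port of A; the inner 'for char in word' string-building loop works over List Char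
def cv_match (sentence : String) (pattern : String) : List String :=
  let words := PySem.Str.split₀ sentence
  words.foldl (fun acc word =>
    if ¬ (word.toList.length = pattern.toList.length) then acc
    else
      let pattern_of_word : List Char :=
        word.toList.foldl (fun s c =>
          if ¬ (c ∈ "aeiouAEIOU".toList) then s ++ ['c'] else s ++ ['v']) []
      if pattern_of_word = pattern.toList then acc ++ [word] else acc) []

-- ===== PORT B =====
-- the cv key of a word (B's ''.join(... for ch in word))
def pvKey (w : String) : List Char :=
  w.toList.map (fun c => if c ∈ "aeiouAEIOU".toList then 'v' else 'c')

-- index.setdefault(key, []).append(word) = insert key (old bucket ++ [word]) (keeps position)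
def cv_match_alt (sentence : String) (pattern : String) : List String :=
  let idx : PySem.Dict (List Char) (List String) :=
    (PySem.Str.split₀ sentence).foldl
      (fun d w => d.insert (pvKey w) (d.getD (pvKey w) [] ++ [w])) PySem.Dict.empty
  idx.getD pattern.toList []

-- ===== PRECONDITION & SPEC =====
def Spec_cv_match (sentence : String) (pattern : String) (out : List String) : Prop := out = cv_match_alt sentence pattern
instance (sentence : String) (pattern : String) (out : List String) : Decidable (Spec_cv_match sentence pattern out) := by unfold Spec_cv_match; infer_instance

-- ===== CLAIM (what is proved, stated in full; the proofs are below) =====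
def Claim_equal_cv_match : Prop := ∀ (sentence : String) (pattern : String), Dom_cv_match sentence pattern → Spec_cv_match sentence pattern (cv_match sentence pattern)

-- ===== LEMMAS AND PROOFS =====

-- A's inner string-building loop computes pvKey
theorem pow_eq_pvKey (w : String) :
    w.toList.foldl (fun s c =>
      if ¬ (c ∈ "aeiouAEIOU".toList) then s ++ ['c'] else s ++ ['v']) [] = pvKey w := by
  unfold pvKey
  have h : (fun (s : List Char) (c : Char) =>
      if ¬ (c ∈ "aeiouAEIOU".toList) then s ++ ['c'] else s ++ ['v'])
      = fun s c => s ++ [if c ∈ "aeiouAEIOU".toList then 'v' else 'c'] := by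
    funext s c
    by_cases hc : c ∈ "aeiouAEIOU".toList
    · rw [if_neg (not_not_intro hc), if_pos hc]
    · rw [if_pos hc, if_neg hc]
  rw [h, PySem.List.foldl_append_singleton_eq_map]
  simp

-- A's whole loop filters the words whose key is the pattern
theorem cv_match_eq_filter (sentence pattern : String) :
    cv_match sentence pattern
      = (PySem.Str.split₀ sentence).filter (fun w => pvKey w = pattern.toList) := by
  unfold cv_match
  have hstep : ∀ (acc : List String) (w : String),
      (if ¬ (w.toList.length = pattern.toList.length) then acc
       else
         if w.toList.foldl (fun s c =>
             if ¬ (c ∈ "aeiouAEIOU".toList) then s ++ ['c'] else s ++ ['v']) []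
            = pattern.toList then acc ++ [w] else acc)
      = (if pvKey w = pattern.toList then acc ++ [w] else acc) := by
    intro acc w
    rw [pow_eq_pvKey]
    by_cases hk : pvKey w = pattern.toList
    · have hlen : w.toList.length = pattern.toList.length := by
        have := congrArg List.length hk
        simpa [pvKey] using this
      simp [hk, hlen]
    · by_cases hl : w.toList.length = pattern.toList.length <;> simp [hk, hl]
  calc (PySem.Str.split₀ sentence).foldl (fun acc word =>
        if ¬ (word.toList.length = pattern.toList.length) then acc
        else
          if word.toList.foldl (fun s c =>
              if ¬ (c ∈ "aeiouAEIOU".toList) then s ++ ['c'] else s ++ ['v']) []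
             = pattern.toList then acc ++ [word] else acc) []
      = (PySem.Str.split₀ sentence).foldl
          (fun acc w => if pvKey w = pattern.toList then acc ++ [w] else acc) [] := by
        exact PySem.List.foldl_congr_mem _ _ _ _ (fun acc w _ => hstep acc w)
    _ = [] ++ (PySem.Str.split₀ sentence).filter (fun w => pvKey w = pattern.toList) := by
        rw [PySem.List.foldl_append_ite_eq_filter]
    _ = (PySem.Str.split₀ sentence).filter (fun w => pvKey w = pattern.toList) := by simp

-- B's index loop invariant: the bucket at p is the old bucket plus the matching words
theorem idx_getD (ws : List String) (p : List Char) (d : PySem.Dict (List Char) (List String)) :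
    (ws.foldl (fun d w => d.insert (pvKey w) (d.getD (pvKey w) [] ++ [w])) d).getD p []
      = d.getD p [] ++ ws.filter (fun w => pvKey w = p) := by
  induction ws generalizing d with
  | nil => simp
  | cons w ws ih =>
    simp only [List.foldl_cons, List.filter_cons, ih]
    by_cases hk : pvKey w = p
    · simp [hk]
    · have : ¬ (p = pvKey w) := fun h => hk h.symm
      simp [hk, PySem.Dict.getD_insert, this]

-- ===== VERDICT (by name: the statement is the Claim_ definition above) =====
theorem cv_match_spec : Claim_equal_cv_match := by
  intro sentence pattern _
  unfold Spec_cv_match cv_match_alt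
  rw [cv_match_eq_filter, idx_getD]
  simp
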